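-- pv_equiv track=rewrite | github.com/MelikbekyanAshot/PythonMIREA | task1/ex3.py | f
-- ===== SOURCE A (Python) =====
-- def f(n, m):
--     a = 0
--     for i in range (1, n+1):
--         for j in range(1, m+1):
--             a += (j - 62*i**5)
--
--     b = 0
--     for i in range (1, n+1):
--         for j in range(1, m+1):
--             b += (62*i**3 + j**2)
--
--     return a - b
-- ===== SOURCE B (Python) =====
-- def f(n, m):
--     N = max(n, 0)
--     M = max(m, 0)
--     s1n = N * (N + 1) // 2
--     s3n = s1n * s1n
--     s5n = s1n * s1n * (2 * N * N + 2 * N - 1) // 3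
--     s1m = M * (M + 1) // 2
--     s2m = M * (M + 1) * (2 * M + 1) // 6
--     return N * s1m - 62 * M * s5n - 62 * M * s3n - N * s2m
-- ===== Notes on version B (the rewrite author's own statement) =====
-- stated objective: faster
-- what changed: B replaces the two O(n*m) nested summation loops by closed-form power-sum formulas (Faulhaber: sums of j, j^2, i^3, i^5), computing the result in O(1) integer arithmetic.
import Mathlib
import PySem

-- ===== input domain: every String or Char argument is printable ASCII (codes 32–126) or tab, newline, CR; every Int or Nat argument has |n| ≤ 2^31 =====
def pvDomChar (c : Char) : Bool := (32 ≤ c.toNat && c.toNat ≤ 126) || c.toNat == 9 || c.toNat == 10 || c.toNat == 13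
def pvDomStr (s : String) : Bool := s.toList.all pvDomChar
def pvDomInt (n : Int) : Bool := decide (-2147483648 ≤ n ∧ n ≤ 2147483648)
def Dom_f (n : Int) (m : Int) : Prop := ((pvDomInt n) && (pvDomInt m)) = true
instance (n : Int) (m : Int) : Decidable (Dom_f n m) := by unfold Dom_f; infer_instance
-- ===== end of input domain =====

-- B replaces the O(n·m) double loops by O(1) closed-form power-sum formulas (faster, asymptotic).

-- ===== PORT A =====
def f (n : Int) (m : Int) : Int :=
  let a := (PySem.List.pyRange 1 (n+1) 1).foldl
    (fun a i => (PySem.List.pyRange 1 (m+1) 1).foldl (fun a j => a + (j - 62*i^5)) a) 0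
  let b := (PySem.List.pyRange 1 (n+1) 1).foldl
    (fun b i => (PySem.List.pyRange 1 (m+1) 1).foldl (fun b j => b + (62*i^3 + j^2)) b) 0
  a - b

-- ===== PORT B =====
def f_alt (n : Int) (m : Int) : Int :=
  let N := max n 0
  let M := max m 0
  let s1n := PySem.Int.floordiv (N*(N+1)) 2
  let s3n := s1n * s1n
  let s5n := PySem.Int.floordiv (s1n*s1n*(2*N*N + 2*N - 1)) 3
  let s1m := PySem.Int.floordiv (M*(M+1)) 2
  let s2m := PySem.Int.floordiv (M*(M+1)*(2*M+1)) 6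
  N*s1m - 62*M*s5n - 62*M*s3n - N*s2m

-- ===== PRECONDITION & SPEC =====
def Spec_f (n : Int) (m : Int) (out : Int) : Prop := out = f_alt n m
instance (n : Int) (m : Int) (out : Int) : Decidable (Spec_f n m out) := by unfold Spec_f; infer_instance

-- ===== CLAIM (what is proved, stated in full; the proofs are below) =====
def Claim_equal_f : Prop := ∀ (n : Int) (m : Int), Dom_f n m → Spec_f n m (f n m)

-- ===== LEMMAS AND PROOFS =====

-- power sums over 1..N (as sums over List.range N of (1+k)^p)
def ps (p : Nat) (N : Nat) : Int := ((List.range N).map (fun (k : Nat) => (1 + (k:Int))^p)).sum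

lemma ps1_eq (N : Nat) : 2 * ps 1 N = (N:Int) * (N+1) := by
  induction N with
  | zero => simp [ps]
  | succ N ih => simp [ps, List.range_succ] at ih ⊢; ring_nf; ring_nf at ih; linarith

lemma ps2_eq (N : Nat) : 6 * ps 2 N = (N:Int) * (N+1) * (2*N+1) := by
  induction N with
  | zero => simp [ps]
  | succ N ih => simp [ps, List.range_succ] at ih ⊢; ring_nf; ring_nf at ih; linarith

lemma ps3_eq (N : Nat) : 4 * ps 3 N = ((N:Int) * (N+1))^2 := by
  induction N with
  | zero => simp [ps]
  | succ N ih => simp [ps, List.range_succ] at ih ⊢; ring_nf; ring_nf at ih; linarith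

lemma ps5_eq (N : Nat) : 12 * ps 5 N = ((N:Int) * (N+1))^2 * (2*(N:Int)*N + 2*N - 1) := by
  induction N with
  | zero => simp [ps]
  | succ N ih =>
      simp [ps, List.range_succ] at ih ⊢
      nlinarith [ih]

-- inner loop of a: sum over j of (j - c)
lemma sumA_inner (M : Nat) (c : Int) :
    ((List.range M).map (fun (l : Nat) => (1 + (l:Int)) - c)).sum = ps 1 M - M * c := by
  induction M with
  | zero => simp [ps]
  | succ M ih => simp [ps, List.range_succ] at ih ⊢; linarith

-- outer loop of a: sum over i of (d - e * i^5)
lemma sumA_outer (N : Nat) (d e : Int) :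
    ((List.range N).map (fun (k : Nat) => d - e * (62 * (1 + (k:Int))^5))).sum = N * d - 62 * e * ps 5 N := by
  induction N with
  | zero => simp [ps]
  | succ N ih => simp [ps, List.range_succ] at ih ⊢; ring_nf; ring_nf at ih; linarith

-- inner loop of b: sum over j of (c + j^2)
lemma sumB_inner (M : Nat) (c : Int) :
    ((List.range M).map (fun (l : Nat) => c + (1 + (l:Int))^2)).sum = M * c + ps 2 M := by
  induction M with
  | zero => simp [ps]
  | succ M ih => simp [ps, List.range_succ] at ih ⊢; linarith

-- outer loop of b: sum over i of (e * i^3 + d)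
lemma sumB_outer (N : Nat) (d e : Int) :
    ((List.range N).map (fun (k : Nat) => e * (62 * (1 + (k:Int))^3) + d)).sum = 62 * e * ps 3 N + N * d := by
  induction N with
  | zero => simp [ps]
  | succ N ih => simp [ps, List.range_succ] at ih ⊢; ring_nf; ring_nf at ih; linarith

lemma fd_exact (c q : Int) (hc : 0 < c) : PySem.Int.floordiv (c*q) c = q := by
  rw [PySem.Int.floordiv_eq_ediv_of_pos hc]
  exact Int.mul_ediv_cancel_left q (by omega)

lemma f_eq_sums (n m : Int) :
    f n m = ((n.toNat:Int) * ps 1 m.toNat - 62 * (m.toNat:Int) * ps 5 n.toNat)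
          - (62 * (m.toNat:Int) * ps 3 n.toNat + (n.toNat:Int) * ps 2 m.toNat) := by
  unfold f
  rw [PySem.List.pyRange_one (a := 1) (b := n+1), PySem.List.pyRange_one (a := 1) (b := m+1)]
  simp only [add_sub_cancel_right, List.foldl_map, PySem.List.foldl_add]
  simp only [sumA_inner, sumB_inner, sumA_outer, sumB_outer]
  ring

lemma alt_eq (n m : Int) :
    f_alt n m = ((n.toNat:Int) * ps 1 m.toNat - 62 * (m.toNat:Int) * ps 5 n.toNat)
          - (62 * (m.toNat:Int) * ps 3 n.toNat + (n.toNat:Int) * ps 2 m.toNat) := by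
  simp only [f_alt]
  rw [show max n 0 = ((n.toNat : Int)) from (Int.toNat_eq_max n).symm,
      show max m 0 = ((m.toNat : Int)) from (Int.toNat_eq_max m).symm]
  have h1n := ps1_eq n.toNat
  have h1m := ps1_eq m.toNat
  have h2m := ps2_eq m.toNat
  have h3n := ps3_eq n.toNat
  have h5n := ps5_eq n.toNat
  have e1n : (n.toNat:Int)*((n.toNat:Int)+1) = 2 * ps 1 n.toNat := by linarith
  have e1m : (m.toNat:Int)*((m.toNat:Int)+1) = 2 * ps 1 m.toNat := by linarith
  rw [e1n, e1m, fd_exact _ _ (by norm_num), fd_exact _ _ (by norm_num)]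
  have e2m : 2 * ps 1 m.toNat * (2*(m.toNat:Int)+1) = 6 * ps 2 m.toNat := by
    rw [← e1m]; linarith
  rw [e2m, fd_exact _ _ (by norm_num)]
  have e5' : 4*(ps 1 n.toNat * ps 1 n.toNat * (2*(n.toNat:Int)*(n.toNat:Int) + 2*(n.toNat:Int) - 1)) = 4*(3 * ps 5 n.toNat) := by
    linear_combination (2*ps 1 n.toNat + (n.toNat:Int)*((n.toNat:Int)+1))*(2*(n.toNat:Int)*(n.toNat:Int)+2*(n.toNat:Int)-1)*h1n - h5n
  have e5 : ps 1 n.toNat * ps 1 n.toNat * (2*(n.toNat:Int)*(n.toNat:Int) + 2*(n.toNat:Int) - 1) = 3 * ps 5 n.toNat := by linarith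
  rw [e5, fd_exact _ _ (by norm_num)]
  have e3' : 4*(ps 1 n.toNat * ps 1 n.toNat) = 4*(ps 3 n.toNat) := by
    linear_combination (2*ps 1 n.toNat + (n.toNat:Int)*((n.toNat:Int)+1))*h1n - h3n
  have e3 : ps 1 n.toNat * ps 1 n.toNat = ps 3 n.toNat := by linarith
  rw [e3]
  ring

theorem f_spec : Claim_equal_f := by
  intro n m _
  unfold Spec_f
  rw [f_eq_sums, alt_eq]
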